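-- pv_equiv track=rewrite | github.com/marcduby/MachineLearningPython | DccKP/GPT/GeneSummaries/geneAbstractsGeneration.py | create_concat_abstracts
-- ===== SOURCE A (Python) =====
-- def create_concat_abstracts(list_abstracts, gene, size_token=4000, log=False):
--     '''
--     creates a sized concatenated abstract from the given list
--     '''
--     result_abstract = ""
--
--     # loop
--     for abstract in list_abstracts:
--         temp_abstract = result_abstract + abstract
--         if len(temp_abstract.split(" ")) < size_token:
--             result_abstract = temp_abstract
--         else:
--             break
--
--     # return
--     return result_abstract
-- ===== SOURCE B (Python) =====
-- def create_concat_abstracts(list_abstracts, gene, size_token=4000, log=False):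
--     '''
--     creates a sized concatenated abstract from the given list
--     '''
--     # word count of a no-separator concatenation is (total ' ' chars) + 1,
--     # so just accumulate space counts and find the cutoff prefix length
--     spaces = 0
--     k = 0
--     for abstract in list_abstracts:
--         spaces += abstract.count(" ")
--         if spaces + 1 >= size_token:
--             break
--         k += 1
--     return "".join(list_abstracts[:k])
-- ===== Notes on version B (the rewrite author's own statement) =====
-- stated objective: faster
-- what changed: B never builds or re-splits the growing string: it keeps a running count of space characters (word count of the concatenation is spaces+1), finds the cutoff prefix length in one pass, and joins that prefix once.
import Mathlib
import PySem

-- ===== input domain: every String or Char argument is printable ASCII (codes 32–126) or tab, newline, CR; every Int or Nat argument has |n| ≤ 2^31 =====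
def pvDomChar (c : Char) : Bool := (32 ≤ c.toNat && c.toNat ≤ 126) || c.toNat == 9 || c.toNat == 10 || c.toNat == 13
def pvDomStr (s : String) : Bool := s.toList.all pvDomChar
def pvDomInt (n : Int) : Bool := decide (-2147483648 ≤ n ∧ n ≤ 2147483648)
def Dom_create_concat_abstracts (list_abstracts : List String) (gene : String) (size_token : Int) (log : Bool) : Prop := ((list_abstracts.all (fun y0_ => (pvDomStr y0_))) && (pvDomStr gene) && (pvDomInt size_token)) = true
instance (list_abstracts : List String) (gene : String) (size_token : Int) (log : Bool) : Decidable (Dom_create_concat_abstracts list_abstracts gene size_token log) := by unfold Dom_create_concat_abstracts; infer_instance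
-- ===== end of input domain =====

-- B replaces A's quadratic re-split of the growing concatenation by a single pass that
-- accumulates per-abstract space counts to find the cutoff prefix, then joins it once (faster).

-- ===== PORT A =====
-- the 'for abstract in list_abstracts' loop with its break; temp.split(" ") is
-- PySem.Chars.splitOn on the code points (the sep is the nonempty literal " ", so
-- Python's split cannot raise and the sep ≠ "" form is exact)
def pvLoopA (size_token : Int) : List String → String → String
  | [], acc => acc
  | a :: rest, acc =>
    let temp := acc ++ a
    if ((PySem.Chars.splitOn temp.toList [' ']).length : Int) < size_token then
      pvLoopA size_token rest temp
    else acc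

def create_concat_abstracts (list_abstracts : List String) (gene : String) (size_token : Int) (log : Bool) : String :=
  pvLoopA size_token list_abstracts ""

-- ===== PORT B =====
-- B's loop: running space count and prefix length k until the cutoff
def pvLoopB (size_token : Int) : List String → Int → Nat → Nat
  | [], _, k => k
  | a :: rest, spaces, k =>
    let spaces' := spaces + (PySem.Str.count a " " : Int)
    if size_token ≤ spaces' + 1 then k
    else pvLoopB size_token rest spaces' (k + 1)

def create_concat_abstracts_alt (list_abstracts : List String) (gene : String) (size_token : Int) (log : Bool) : String :=
  PySem.Str.join "" (list_abstracts.take (pvLoopB size_token list_abstracts 0 0))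

-- ===== PRECONDITION & SPEC =====
def Spec_create_concat_abstracts (list_abstracts : List String) (gene : String) (size_token : Int) (log : Bool) (out : String) : Prop := out = create_concat_abstracts_alt list_abstracts gene size_token log
instance (list_abstracts : List String) (gene : String) (size_token : Int) (log : Bool) (out : String) : Decidable (Spec_create_concat_abstracts list_abstracts gene size_token log out) := by unfold Spec_create_concat_abstracts; infer_instance

-- ===== CLAIM (what is proved, stated in full; the proofs are below) =====
def Claim_equal_create_concat_abstracts : Prop := ∀ (list_abstracts : List String) (gene : String) (size_token : Int) (log : Bool), Dom_create_concat_abstracts list_abstracts gene size_token log → Spec_create_concat_abstracts list_abstracts gene size_token log (create_concat_abstracts list_abstracts gene size_token log)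

-- ===== LEMMAS AND PROOFS =====

-- count.go with a single-character needle and enough fuel is List.count
theorem pv_count_go_single (c : Char) : ∀ (fuel : Nat) (l : List Char) (acc : Nat),
    l.length ≤ fuel → PySem.Chars.count.go [c] fuel l acc = acc + l.count c
  | 0, l, acc, h => by
    have : l = [] := List.eq_nil_of_length_eq_zero (Nat.le_zero.mp h)
    subst this; simp [PySem.Chars.count.go]
  | fuel + 1, [], acc, _ => by simp [PySem.Chars.count.go]
  | fuel + 1, x :: t, acc, h => by
    simp only [PySem.Chars.count.go]
    have hpre : [c].isPrefixOf (x :: t) = (c == x) := by simp [List.isPrefixOf]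
    rw [hpre]
    by_cases hc : c = x
    · subst hc
      simp only [beq_self_eq_true, if_pos]
      rw [show List.drop [c].length (c :: t) = t from rfl]
      rw [pv_count_go_single c fuel t (acc + 1) (by simpa using Nat.le_of_succ_le_succ h)]
      simp
      omega
    · rw [show (c == x) = false by simp [hc]]
      simp only [Bool.false_eq_true, if_false]
      rw [pv_count_go_single c fuel t acc (by simpa using Nat.le_of_succ_le_succ h)]
      simp [Ne.symm hc]

theorem pv_count_single (c : Char) (l : List Char) :
    PySem.Chars.count l [c] = l.count c := by
  simp only [PySem.Chars.count, List.isEmpty]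
  exact (pv_count_go_single c l.length l 0 le_rfl).trans (by simp)

-- splitOn.go with a single-character separator and enough fuel yields count+1 pieces
theorem pv_splitOn_go_len (c : Char) : ∀ (fuel : Nat) (l cur : List Char) (acc : List (List Char)),
    l.length ≤ fuel →
    (PySem.Chars.splitOn.go [c] fuel l cur acc).length = acc.length + l.count c + 1
  | 0, l, cur, acc, h => by
    have : l = [] := List.eq_nil_of_length_eq_zero (Nat.le_zero.mp h)
    subst this; simp [PySem.Chars.splitOn.go]
  | fuel + 1, [], cur, acc, _ => by simp [PySem.Chars.splitOn.go]
  | fuel + 1, x :: t, cur, acc, h => by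
    simp only [PySem.Chars.splitOn.go]
    have hpre : [c].isPrefixOf (x :: t) = (c == x) := by simp [List.isPrefixOf]
    rw [hpre]
    by_cases hc : c = x
    · subst hc
      simp only [beq_self_eq_true, if_pos]
      rw [show List.drop [c].length (c :: t) = t from rfl]
      rw [pv_splitOn_go_len c fuel t [] (cur.reverse :: acc)
        (by simpa using Nat.le_of_succ_le_succ h)]
      simp
      omega
    · rw [show (c == x) = false by simp [hc]]
      simp only [Bool.false_eq_true, if_false]
      rw [pv_splitOn_go_len c fuel t (x :: cur) acc (by simpa using Nat.le_of_succ_le_succ h)]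
      simp [Ne.symm hc]

theorem pv_splitOn_len (c : Char) (l : List Char) :
    (PySem.Chars.splitOn l [c]).length = l.count c + 1 := by
  simpa using pv_splitOn_go_len c (l.length + 1) l [] [] (Nat.le_succ _)

theorem pv_join_nil_sep (xs : List (List Char)) : PySem.Chars.join [] xs = xs.flatten := by
  simp only [PySem.Chars.join]
  induction xs with
  | nil => simp [List.intercalate]
  | cons a t ih =>
    cases t with
    | nil => simp [List.intercalate]
    | cons b u =>
      simp [List.intercalate] at ih ⊢
      simpa using ih

-- B's k accumulator only shifts the result
theorem pv_loopB_shift (st : Int) : ∀ (l : List String) (spaces : Int) (k : Nat),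
    pvLoopB st l spaces k = pvLoopB st l spaces 0 + k
  | [], _, k => by simp [pvLoopB]
  | a :: rest, spaces, k => by
    simp only [pvLoopB]
    split
    · omega
    · rw [pv_loopB_shift st rest _ (k + 1), pv_loopB_shift st rest _ (0 + 1)]
      omega

-- the loop invariant: A's accumulated string is acc followed by the join of the
-- prefix B's counter selects, when B starts from acc's space count
theorem pv_main (st : Int) : ∀ (l : List String) (acc : String),
    pvLoopA st l acc =
      acc ++ PySem.Str.join "" (l.take (pvLoopB st l ((acc.toList.count ' ' : Int)) 0))
  | [], acc => by
    apply String.toList_inj.mp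
    simp [pvLoopA, pvLoopB, PySem.Str.join]
  | a :: rest, acc => by
    have hsp : (PySem.Str.count a " " : Int) = (a.toList.count ' ' : Int) := by
      simp only [PySem.Str.count]
      rw [show (" " : String).toList = [' '] from rfl, pv_count_single]
    have hlen : ((PySem.Chars.splitOn (acc ++ a).toList [' ']).length : Int)
        = (acc.toList.count ' ' : Int) + (a.toList.count ' ' : Int) + 1 := by
      rw [pv_splitOn_len]
      push_cast [String.toList_append, List.count_append]
      ring
    simp only [pvLoopA, pvLoopB]
    by_cases h : ((PySem.Chars.splitOn (acc ++ a).toList [' ']).length : Int) < st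
    · have hB : ¬ st ≤ (acc.toList.count ' ' : Int) + (PySem.Str.count a " " : Int) + 1 := by
        rw [hsp]; rw [hlen] at h; omega
      rw [if_pos h, if_neg hB]
      rw [pv_main st rest (acc ++ a)]
      rw [pv_loopB_shift st rest _ (0 + 1)]
      have hcnt : ((acc ++ a).toList.count ' ' : Int)
          = (acc.toList.count ' ' : Int) + (PySem.Str.count a " " : Int) := by
        rw [hsp]; push_cast [String.toList_append, List.count_append]; ring
      rw [hcnt]
      apply String.toList_inj.mp
      simp [PySem.Str.join, pv_join_nil_sep, List.take_succ_cons]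
    · have hB : st ≤ (acc.toList.count ' ' : Int) + (PySem.Str.count a " " : Int) + 1 := by
        rw [hsp]; rw [hlen] at h; omega
      rw [if_neg h, if_pos hB]
      apply String.toList_inj.mp
      simp [PySem.Str.join]

-- ===== VERDICT (by name: the statement is the Claim_ definition above) =====
theorem create_concat_abstracts_spec : Claim_equal_create_concat_abstracts := by
  intro list_abstracts gene size_token log _
  unfold Spec_create_concat_abstracts create_concat_abstracts create_concat_abstracts_alt
  have := pv_main size_token list_abstracts ""
  simpa using this
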